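-- pv_equiv track=rewrite | github.com/Geoff1938/tennis-pairings | pairings.py | compute_display_names
-- ===== SOURCE A (Python) =====
-- from typing import Callable, Iterable
--
-- def compute_display_names(full_names: Iterable[str]) -> dict[str, str]:
--     """Return ``{full_name: short_display_name}`` for a list of full names.
--
--     ``First L`` style where ``L`` is the shortest surname prefix unique
--     within each first-name group. Single-token names stay as-is.
--     """
--     names = list(dict.fromkeys(full_names))
--     parsed: dict[str, tuple[str, str]] = {}
--     for n in names:
--         tokens = n.strip().split()
--         if not tokens:
--             parsed[n] = ("", "")
--             continue
--         parsed[n] = (tokens[0], " ".join(tokens[1:]) if len(tokens) > 1 else "")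
--
--     from collections import defaultdict
--
--     groups: dict[str, list[str]] = defaultdict(list)
--     for n in names:
--         groups[parsed[n][0].lower()].append(n)
--
--     display: dict[str, str] = {}
--     for bucket in groups.values():
--         if len(bucket) == 1:
--             n = bucket[0]
--             first, _ = parsed[n]
--             display[n] = first or n
--             continue
--         surnames_in_bucket = [parsed[n][1] for n in bucket if parsed[n][1]]
--         for n in bucket:
--             first, surname = parsed[n]
--             if not surname:
--                 display[n] = first
--                 continue
--             chosen: str | None = None
--             for k in range(1, len(surname) + 1):
--                 prefix = surname[:k].lower()
--                 collides = any(
--                     other_surname != surname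
--                     and other_surname.lower().startswith(prefix)
--                     for other_surname in surnames_in_bucket
--                 )
--                 if not collides:
--                     chosen = (
--                         surname if k >= len(surname) else surname[:k].capitalize()
--                     )
--                     break
--             display[n] = f"{first} {chosen}" if chosen else f"{first} {surname}"
--         seen: dict[str, int] = {}
--         for n in bucket:
--             rendered = display[n]
--             if rendered in seen:
--                 seen[rendered] += 1
--                 display[n] = f"{rendered} #{seen[rendered]}"
--             else:
--                 seen[rendered] = 1
--     return display
-- ===== SOURCE B (Python) =====
-- def _lcp(a, b):
--     i = 0
--     m = min(len(a), len(b))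
--     while i < m and a[i] == b[i]:
--         i += 1
--     return i
--
--
-- def compute_display_names(full_names):
--     """Same result as A: shortest-unique-surname-prefix display names.
--
--     Different strategy: instead of searching prefix lengths k and scanning the
--     bucket for a collision at each k, compute for each surname the longest
--     case-insensitive match against any *different* surname in its bucket once
--     (a single lcp per pair); the needed prefix length is that maximum plus one.
--     The '#n' duplicate suffixes are attached in the same pass with a counter.
--     """
--     names = list(dict.fromkeys(full_names))
--
--     def parse(n):
--         t = n.strip().split()
--         return (t[0], " ".join(t[1:])) if t else ("", "")
--
--     parsed = {n: parse(n) for n in names}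
--
--     order = []
--     groups = {}
--     for n in names:
--         key = parsed[n][0].lower()
--         if key not in groups:
--             groups[key] = []
--             order.append(key)
--         groups[key].append(n)
--
--     display = {}
--     for key in order:
--         bucket = groups[key]
--         if len(bucket) == 1:
--             n = bucket[0]
--             first = parsed[n][0]
--             display[n] = first if first else n
--             continue
--         surnames = [parsed[n][1] for n in bucket if parsed[n][1]]
--         counts = {}
--         for n in bucket:
--             first, surname = parsed[n]
--             if not surname:
--                 rendered = first
--             else:
--                 s_low = surname.lower()
--                 m = 0
--                 for o in surnames:
--                     if o != surname:
--                         m = max(m, min(len(o), _lcp(s_low, o.lower())))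
--                 k = m + 1
--                 if k >= len(surname):
--                     rendered = first + " " + surname
--                 else:
--                     rendered = first + " " + surname[:k].capitalize()
--             c = counts.get(rendered, 0) + 1
--             counts[rendered] = c
--             display[n] = rendered if c == 1 else f"{rendered} #{c}"
--     return display
-- ===== Notes on version B (the rewrite author's own statement) =====
-- stated objective: alternative
-- what changed: Per name, A searches prefix lengths k=1..len(surname) and rescans the whole bucket with startswith at each k; B computes one longest-common-prefix per pair of distinct surnames and reads the needed length as max-lcp+1, and it merges A's two per-bucket passes (naming, then '#n' dedup) into a single pass with a counter dict.
import Mathlib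
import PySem

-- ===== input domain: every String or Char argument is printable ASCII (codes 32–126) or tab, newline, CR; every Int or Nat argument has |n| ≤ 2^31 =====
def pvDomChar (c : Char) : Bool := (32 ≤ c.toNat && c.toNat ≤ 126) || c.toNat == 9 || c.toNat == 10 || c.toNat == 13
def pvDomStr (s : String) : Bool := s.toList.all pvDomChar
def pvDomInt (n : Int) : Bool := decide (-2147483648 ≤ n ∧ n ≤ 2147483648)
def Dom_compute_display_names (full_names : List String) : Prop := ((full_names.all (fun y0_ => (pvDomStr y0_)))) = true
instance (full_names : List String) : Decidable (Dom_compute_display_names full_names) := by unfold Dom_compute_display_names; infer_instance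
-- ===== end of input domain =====

-- B replaces A's per-prefix-length collision rescan by a single longest-common-prefix
-- computation per pair of surnames, and merges A's two per-bucket passes into one.

-- ===== PORT A =====

-- shared port of str.capitalize() (first char uppercased, rest lowercased; ASCII-exact)
def pvCapitalize (cs : List Char) : List Char :=
  match cs with
  | [] => []
  | c :: rest => PySem.Chars.upperChar c :: PySem.Chars.lower rest

-- the 'parsed' loop of A
def pvA_parsed (names : List String) : PySem.Dict String (String × String) :=
  names.foldl (fun d n =>
    match PySem.Str.split₀ (PySem.Str.strip n) with
    | [] => d.insert n ("", "")
    | t0 :: rest =>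
        d.insert n (t0, if (t0 :: rest).length > 1 then PySem.Str.join " " rest else ""))
    PySem.Dict.empty

-- the defaultdict(list) grouping loop of A
def pvA_groups (names : List String) (parsed : PySem.Dict String (String × String)) :
    PySem.Dict String (List String) :=
  names.foldl (fun g n =>
    g.modify (PySem.Str.lower (parsed.getD n ("", "")).1) [] (· ++ [n])) PySem.Dict.empty

-- 'collides' for prefix length k (surname[:k] with 0 ≤ k is List.take k)
def pvA_collides (surname : String) (sb : List String) (k : Nat) : Bool :=
  sb.any (fun o => o != surname &&
    PySem.Chars.startswith (PySem.Chars.lower o.toList)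
      (PySem.Chars.lower (surname.toList.take k)))

-- the 'for k in range(1, len(surname)+1): … break' search of A
def pvA_chosen (surname : String) (sb : List String) (k : Nat) : Option String :=
  if k ≤ surname.toList.length then
    if pvA_collides surname sb k then pvA_chosen surname sb (k + 1)
    else some (if k ≥ surname.toList.length then surname
               else String.ofList (pvCapitalize (surname.toList.take k)))
  else none
termination_by surname.toList.length + 1 - k
decreasing_by simp only [String.length_toList] at *; omega

-- one bucket of A's display loop (first the naming pass, then the '#n' dedup pass)
def pvA_displayBucket (parsed : PySem.Dict String (String × String))
    (display : PySem.Dict String String) (bucket : List String) :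
    PySem.Dict String String :=
  if bucket.length == 1 then
    match bucket with
    | [] => display
    | n :: _ =>
      let first := (parsed.getD n ("", "")).1
      display.insert n (if first != "" then first else n)
  else
    let sb := (bucket.map (fun n => (parsed.getD n ("", "")).2)).filter (fun s => s != "")
    let display := bucket.foldl (fun disp n =>
      let p := parsed.getD n ("", "")
      if p.2 == "" then disp.insert n p.1
      else
        match pvA_chosen p.2 sb 1 with
        | some c => disp.insert n (String.ofList (p.1.toList ++ ' ' :: c.toList))
        | none => disp.insert n (String.ofList (p.1.toList ++ ' ' :: p.2.toList))) display
    (bucket.foldl (fun (st : PySem.Dict String Int × PySem.Dict String String) n =>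
      let rendered := st.2.getD n ""
      if st.1.contains rendered then
        let c := st.1.getD rendered 0 + 1
        (st.1.insert rendered c,
         st.2.insert n (String.ofList (rendered.toList ++ ' ' :: '#' :: PySem.Int.toChars c)))
      else (st.1.insert rendered 1, st.2)) (PySem.Dict.empty, display)).2

def compute_display_names (full_names : List String) : List (String × String) :=
  let names := PySem.List.dedup full_names
  let parsed := pvA_parsed names
  let groups := pvA_groups names parsed
  (groups.values.foldl (pvA_displayBucket parsed) PySem.Dict.empty).items

-- ===== PORT B =====

-- Source B's _lcp (the while loop over indices, as the obvious structural recursion)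
def pvLcp : List Char → List Char → Nat
  | a :: as_, b :: bs => if a = b then pvLcp as_ bs + 1 else 0
  | _, _ => 0

def pvB_parse (n : String) : String × String :=
  match PySem.Str.split₀ (PySem.Str.strip n) with
  | [] => ("", "")
  | t0 :: rest => (t0, PySem.Str.join " " rest)

-- the dict comprehension {n: parse(n) for n in names}
def pvB_parsed (names : List String) : PySem.Dict String (String × String) :=
  names.foldl (fun d n => d.insert n (pvB_parse n)) PySem.Dict.empty

-- the order/groups loop of Source B
def pvB_groups (names : List String) (parsed : PySem.Dict String (String × String)) :
    List String × PySem.Dict String (List String) :=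
  names.foldl (fun st n =>
    let key := PySem.Str.lower (parsed.getD n ("", "")).1
    if st.2.contains key then (st.1, st.2.modify key [] (· ++ [n]))
    else (st.1 ++ [key], (st.2.insert key []).modify key [] (· ++ [n])))
    ([], PySem.Dict.empty)

-- Source B's single per-bucket pass: closed-form prefix length (max lcp + 1) and the
-- '#n' counter maintained in the same loop
def pvB_renderBucket (parsed : PySem.Dict String (String × String))
    (display : PySem.Dict String String) (bucket : List String) :
    PySem.Dict String String :=
  if bucket.length == 1 then
    match bucket with
    | [] => display
    | n :: _ =>
      let first := (parsed.getD n ("", "")).1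
      display.insert n (if first != "" then first else n)
  else
    let surnames := (bucket.map (fun n => (parsed.getD n ("", "")).2)).filter (fun s => s != "")
    (bucket.foldl (fun (st : PySem.Dict String Int × PySem.Dict String String) n =>
      let p := parsed.getD n ("", "")
      let rendered :=
        if p.2 == "" then p.1
        else
          let sLow := PySem.Chars.lower p.2.toList
          let m := surnames.foldl (fun m o =>
            if o != p.2 then
              max m (min o.toList.length (pvLcp sLow (PySem.Chars.lower o.toList)))
            else m) 0
          if m + 1 ≥ p.2.toList.length then String.ofList (p.1.toList ++ ' ' :: p.2.toList)
          else String.ofList (p.1.toList ++ ' ' :: pvCapitalize (p.2.toList.take (m + 1)))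
      let c := st.1.getD rendered 0 + 1
      (st.1.insert rendered c,
       st.2.insert n (if c == 1 then rendered
                      else String.ofList (rendered.toList ++ ' ' :: '#' :: PySem.Int.toChars c))))
      (PySem.Dict.empty, display)).2

def compute_display_names_alt (full_names : List String) : List (String × String) :=
  let names := PySem.List.dedup full_names
  let parsed := pvB_parsed names
  let og := pvB_groups names parsed
  (og.1.foldl (fun disp key => pvB_renderBucket parsed disp (og.2.getD key [])) PySem.Dict.empty).items

-- ===== PRECONDITION & SPEC =====
def Spec_compute_display_names (full_names : List String) (out : List (String × String)) : Prop := out = compute_display_names_alt full_names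
instance (full_names : List String) (out : List (String × String)) : Decidable (Spec_compute_display_names full_names out) := by unfold Spec_compute_display_names; infer_instance

-- ===== CLAIM (what is proved, stated in full; the proofs are below) =====
def Claim_equal_compute_display_names : Prop := ∀ (full_names : List String), Dom_compute_display_names full_names → Spec_compute_display_names full_names (compute_display_names full_names)

-- ===== LEMMAS AND PROOFS =====

-- proof-side abbreviations
def pvKey (parsed : PySem.Dict String (String × String)) (n : String) : String :=
  PySem.Str.lower (parsed.getD n ("", "")).1

def pvM (surname : String) (sb : List String) : Nat :=
  sb.foldl (fun m o =>
    if o != surname then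
      max m (min o.toList.length (pvLcp (PySem.Chars.lower surname.toList) (PySem.Chars.lower o.toList)))
    else m) 0

def pvRend (parsed : PySem.Dict String (String × String)) (sb : List String) (n : String) : String :=
  let p := parsed.getD n ("", "")
  if p.2 == "" then p.1
  else
    if pvM p.2 sb + 1 ≥ p.2.toList.length then String.ofList (p.1.toList ++ ' ' :: p.2.toList)
    else String.ofList (p.1.toList ++ ' ' :: pvCapitalize (p.2.toList.take (pvM p.2 sb + 1)))

def pvInv (seen : PySem.Dict String Int) : Prop := ∀ r v, seen.get? r = some v → 1 ≤ v

-- the two parsing loops insert the same values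
theorem pv_parsed_eq (names : List String) : pvA_parsed names = pvB_parsed names := by
  unfold pvA_parsed pvB_parsed pvB_parse
  have h : ∀ (d : PySem.Dict String (String × String)) (n : String),
      (match PySem.Str.split₀ (PySem.Str.strip n) with
       | [] => d.insert n ("", "")
       | t0 :: rest =>
           d.insert n (t0, if (t0 :: rest).length > 1 then PySem.Str.join " " rest else ""))
      = d.insert n
          (match PySem.Str.split₀ (PySem.Str.strip n) with
           | [] => ("", "")
           | t0 :: rest => (t0, PySem.Str.join " " rest)) := by
    intro d n
    cases h : PySem.Str.split₀ (PySem.Str.strip n) with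
    | nil => rfl
    | cons t0 rest => cases rest with
      | nil => rfl
      | cons b bs => rfl
  rw [show (fun (d : PySem.Dict String (String × String)) (n : String) =>
      match PySem.Str.split₀ (PySem.Str.strip n) with
      | [] => d.insert n ("", "")
      | t0 :: rest =>
          d.insert n (t0, if (t0 :: rest).length > 1 then PySem.Str.join " " rest else ""))
    = (fun (d : PySem.Dict String (String × String)) (n : String) =>
        d.insert n
          (match PySem.Str.split₀ (PySem.Str.strip n) with
           | [] => ("", "")
           | t0 :: rest => (t0, PySem.Str.join " " rest)))
    from funext fun d => funext fun n => h d n]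

-- pvLcp vs prefix testing
theorem pv_lcp_key (x y : List Char) (k : Nat) (h1 : 1 ≤ k) (h2 : k ≤ x.length) :
    ((x.take k).isPrefixOf y = true ↔ k ≤ min y.length (pvLcp x y)) := by
  induction x generalizing y k with
  | nil => simp at h2; omega
  | cons a x' ih =>
    obtain ⟨j, rfl⟩ : ∃ j, k = j + 1 := ⟨k - 1, by omega⟩
    cases y with
    | nil => simp [List.take]
    | cons b y' =>
      by_cases hab : a = b
      · subst hab
        simp only [List.take, List.isPrefixOf, BEq.rfl, Bool.true_and, pvLcp, if_pos]
        cases j with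
        | zero => simp
        | succ i =>
          rw [ih y' (i + 1) (by omega) (by simp at h2; omega)]
          simp [Nat.succ_min_succ]
      · simp [List.take, List.isPrefixOf, pvLcp, hab, beq_iff_eq]

theorem pv_le_M_iff (s : String) (sb : List String) (k : Nat) (h1 : 1 ≤ k) :
    (k ≤ pvM s sb ↔ ∃ o ∈ sb, o ≠ s ∧
      k ≤ min o.toList.length (pvLcp (PySem.Chars.lower s.toList) (PySem.Chars.lower o.toList))) := by
  unfold pvM
  have H : ∀ (l : List String) (a : Nat),
      (k ≤ l.foldl (fun m o =>
        if o != s then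
          max m (min o.toList.length (pvLcp (PySem.Chars.lower s.toList) (PySem.Chars.lower o.toList)))
        else m) a
      ↔ k ≤ a ∨ ∃ o ∈ l, o ≠ s ∧
          k ≤ min o.toList.length (pvLcp (PySem.Chars.lower s.toList) (PySem.Chars.lower o.toList))) := by
    intro l
    induction l with
    | nil => simp
    | cons o l ihl =>
      intro a
      simp only [List.foldl_cons]
      by_cases ho : o = s
      · subst ho
        rw [if_neg (by simp), ihl]
        constructor
        · rintro (h | ⟨o', m, hne, hk⟩)
          · exact .inl h
          · exact .inr ⟨o', List.mem_cons_of_mem _ m, hne, hk⟩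
        · rintro (h | ⟨o', m, hne, hk⟩)
          · exact .inl h
          · rcases List.mem_cons.mp m with rfl | m'
            · exact absurd rfl hne
            · exact .inr ⟨o', m', hne, hk⟩
      · rw [if_pos (bne_iff_ne.mpr ho), ihl, le_max_iff]
        constructor
        · rintro ((h | h) | ⟨o', m, hne, hk⟩)
          · exact .inl h
          · exact .inr ⟨o, List.mem_cons_self, ho, h⟩
          · exact .inr ⟨o', List.mem_cons_of_mem _ m, hne, hk⟩
        · rintro (h | ⟨o', m, hne, hk⟩)
          · exact .inl (.inl h)
          · rcases List.mem_cons.mp m with rfl | m'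
            · exact .inl (.inr hk)
            · exact .inr ⟨o', m', hne, hk⟩
  rw [H sb 0]
  have h0 : ¬ k ≤ 0 := by omega
  tauto

theorem pv_collides_iff (s : String) (sb : List String) (k : Nat) (h1 : 1 ≤ k)
    (h2 : k ≤ s.toList.length) : (pvA_collides s sb k = true ↔ k ≤ pvM s sb) := by
  rw [pv_le_M_iff s sb k h1]
  unfold pvA_collides
  rw [List.any_eq_true]
  constructor
  · rintro ⟨o, ho, hb⟩
    rw [Bool.and_eq_true, bne_iff_ne] at hb
    obtain ⟨hne, hsw⟩ := hb
    have hlt : PySem.Chars.lower (s.toList.take k) = (PySem.Chars.lower s.toList).take k := by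
      simp [PySem.Chars.lower, List.map_take]
    rw [show PySem.Chars.startswith (PySem.Chars.lower o.toList)
          (PySem.Chars.lower (s.toList.take k))
        = ((PySem.Chars.lower (s.toList.take k)).isPrefixOf (PySem.Chars.lower o.toList))
      from rfl, hlt] at hsw
    have hlen : k ≤ (PySem.Chars.lower s.toList).length := by
      simpa [PySem.Chars.lower] using h2
    have := (pv_lcp_key (PySem.Chars.lower s.toList) (PySem.Chars.lower o.toList) k h1 hlen).mp hsw
    exact ⟨o, ho, hne, by simpa [PySem.Chars.lower] using this⟩
  · rintro ⟨o, ho, hne, hk⟩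
    refine ⟨o, ho, ?_⟩
    rw [Bool.and_eq_true, bne_iff_ne]
    refine ⟨hne, ?_⟩
    have hlt : PySem.Chars.lower (s.toList.take k) = (PySem.Chars.lower s.toList).take k := by
      simp [PySem.Chars.lower, List.map_take]
    rw [show PySem.Chars.startswith (PySem.Chars.lower o.toList)
          (PySem.Chars.lower (s.toList.take k))
        = ((PySem.Chars.lower (s.toList.take k)).isPrefixOf (PySem.Chars.lower o.toList))
      from rfl, hlt]
    have hlen : k ≤ (PySem.Chars.lower s.toList).length := by
      simpa [PySem.Chars.lower] using h2
    exact (pv_lcp_key (PySem.Chars.lower s.toList) (PySem.Chars.lower o.toList) k h1 hlen).mpr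
      (by simpa [PySem.Chars.lower] using hk)

theorem pv_chosen_eq (s : String) (sb : List String) :
    ∀ (d k : Nat), 1 ≤ k → k + d = pvM s sb + 1 →
    pvA_chosen s sb k =
      (if pvM s sb + 1 ≤ s.toList.length then
        some (if pvM s sb + 1 ≥ s.toList.length then s
              else String.ofList (pvCapitalize (s.toList.take (pvM s sb + 1))))
       else none) := by
  intro d
  induction d with
  | zero =>
    intro k h1 hk
    have hkM : k = pvM s sb + 1 := by omega
    subst hkM
    rw [pvA_chosen]
    by_cases hlen : pvM s sb + 1 ≤ s.toList.length
    · have hcol : pvA_collides s sb (pvM s sb + 1) = false := by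
        by_cases hc : pvA_collides s sb (pvM s sb + 1) = true
        · exact absurd ((pv_collides_iff s sb _ (by omega) hlen).mp hc) (by omega)
        · simpa using hc
      rw [if_pos hlen, hcol]
      rw [if_neg (by simp)]
      rw [if_pos hlen]
    · rw [if_neg hlen, if_neg hlen]
  | succ d ih =>
    intro k h1 hk
    rw [pvA_chosen]
    by_cases hlen : k ≤ s.toList.length
    · have hcol : pvA_collides s sb k = true := by
        rw [pv_collides_iff s sb k h1 hlen]; omega
      rw [if_pos hlen, if_pos hcol]
      exact ih (k + 1) (by omega) (by omega)
    · rw [if_neg hlen, if_neg (by omega)]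

-- A's naming pass inserts exactly pvRend
theorem pv_rendA_pt (parsed : PySem.Dict String (String × String)) (sb : List String)
    (disp : PySem.Dict String String) (n : String) :
    (let p := parsed.getD n ("", "")
     if p.2 == "" then disp.insert n p.1
     else
       match pvA_chosen p.2 sb 1 with
       | some c => disp.insert n (String.ofList (p.1.toList ++ ' ' :: c.toList))
       | none => disp.insert n (String.ofList (p.1.toList ++ ' ' :: p.2.toList)))
    = disp.insert n (pvRend parsed sb n) := by
  unfold pvRend
  by_cases h : (parsed.getD n ("", "")).2 == ""
  · simp [h]
  · simp only [h, Bool.false_eq_true, if_false]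
    rw [pv_chosen_eq (parsed.getD n ("", "")).2 sb (pvM (parsed.getD n ("", "")).2 sb) 1
      le_rfl (by omega)]
    by_cases hle : pvM (parsed.getD n ("", "")).2 sb + 1 ≤ (parsed.getD n ("", "")).2.toList.length
    · rw [if_pos hle]
      by_cases hge : pvM (parsed.getD n ("", "")).2 sb + 1 ≥ (parsed.getD n ("", "")).2.toList.length
      · rw [if_pos hge, if_pos hge]
      · rw [if_neg hge, if_neg hge]
        simp only [String.toList_ofList]
    · rw [if_neg hle]
      rw [if_pos (by omega : pvM (parsed.getD n ("", "")).2 sb + 1 ≥ (parsed.getD n ("", "")).2.toList.length)]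

-- dict plumbing
theorem pv_insert_comm_of_contains {ν : Type} (d : PySem.Dict String ν) (n x : String)
    (v w : ν) (h : d.contains n = true) (hxn : x ≠ n) :
    (d.insert x w).insert n v = (d.insert n v).insert x w := by
  have hc1 : (d.insert x w).contains n = true := by
    rw [PySem.Dict.contains_insert]; simp [h]
  have hc2 : (d.insert n v).contains x = d.contains x := by
    rw [PySem.Dict.contains_insert]; simp [hxn]
  by_cases hx : d.contains x = true
  · apply PySem.Dict.ext
    rw [PySem.Dict.items_insert_of_contains _ v hc1,
        PySem.Dict.items_insert_of_contains _ w hx,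
        PySem.Dict.items_insert_of_contains _ w (by rw [hc2]; exact hx),
        PySem.Dict.items_insert_of_contains _ v h,
        List.map_map, List.map_map]
    apply List.map_congr_left
    intro p _
    by_cases hpx : p.1 = x
    · have hpn : p.1 ≠ n := by rw [hpx]; exact hxn
      simp [Function.comp, hpx, hxn]
    · by_cases hpn : p.1 = n
      · simp [Function.comp, hpn, Ne.symm hxn]
      · simp [Function.comp, hpx, hpn]
  · have hx' : d.contains x = false := by simpa using hx
    apply PySem.Dict.ext
    rw [PySem.Dict.items_insert_of_contains _ v hc1,
        PySem.Dict.items_insert_of_not_contains _ w hx',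
        PySem.Dict.items_insert_of_not_contains _ w (by rw [hc2]; exact hx'),
        PySem.Dict.items_insert_of_contains _ v h,
        List.map_append]
    simp [hxn]

theorem pv_foldl_insert_comm {ν : Type} (f : String → ν) (l : List String)
    (d : PySem.Dict String ν) (n : String) (v : ν) (h : d.contains n = true) (hn : n ∉ l) :
    (l.foldl (fun d x => d.insert x (f x)) d).insert n v
      = l.foldl (fun d x => d.insert x (f x)) (d.insert n v) := by
  induction l generalizing d with
  | nil => rfl
  | cons y ys ih =>
    simp only [List.foldl_cons]
    have hny : y ≠ n := fun he => hn (he ▸ List.mem_cons_self)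
    rw [ih _ (by rw [PySem.Dict.contains_insert]; simp [h])
        (fun hm => hn (List.mem_cons_of_mem _ hm))]
    rw [pv_insert_comm_of_contains d n y v (f y) h hny]

theorem pv_getD_foldl_insert_not_mem {ν : Type} (f : String → ν) (l : List String)
    (d : PySem.Dict String ν) (n : String) (v : ν) (hn : n ∉ l) :
    (l.foldl (fun d x => d.insert x (f x)) d).getD n v = d.getD n v := by
  induction l generalizing d with
  | nil => rfl
  | cons x xs ih =>
    simp only [List.foldl_cons]
    rw [ih _ (fun hm => hn (List.mem_cons_of_mem _ hm))]
    exact PySem.Dict.getD_insert_of_ne d (f x) v (fun he => hn (he ▸ List.mem_cons_self))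

-- A's two per-bucket passes equal B's single pass
theorem pv_passes_eq (rend : String → String) :
    ∀ (bucket : List String) (seen : PySem.Dict String Int) (dispB : PySem.Dict String String),
    bucket.Nodup → pvInv seen →
    (bucket.foldl (fun (st : PySem.Dict String Int × PySem.Dict String String) n =>
        let rendered := st.2.getD n ""
        if st.1.contains rendered then
          let c := st.1.getD rendered 0 + 1
          (st.1.insert rendered c,
           st.2.insert n (String.ofList (rendered.toList ++ ' ' :: '#' :: PySem.Int.toChars c)))
        else (st.1.insert rendered 1, st.2))
      (seen, bucket.foldl (fun d n => d.insert n (rend n)) dispB)).2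
    = (bucket.foldl (fun (st : PySem.Dict String Int × PySem.Dict String String) n =>
        let c := st.1.getD (rend n) 0 + 1
        (st.1.insert (rend n) c,
         st.2.insert n (if c == 1 then rend n
                        else String.ofList ((rend n).toList ++ ' ' :: '#' :: PySem.Int.toChars c))))
      (seen, dispB)).2 := by
  intro bucket
  induction bucket with
  | nil => intro seen dispB _ _; rfl
  | cons n rest ih =>
    intro seen dispB hnd hinv
    have hn : n ∉ rest := (List.nodup_cons.mp hnd).1
    have hrest : rest.Nodup := (List.nodup_cons.mp hnd).2
    simp only [List.foldl_cons]
    have hread : ((rest.foldl (fun d x => d.insert x (rend x)) (dispB.insert n (rend n))).getD n "")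
        = rend n := by
      rw [pv_getD_foldl_insert_not_mem _ _ _ _ _ hn, PySem.Dict.getD_insert_self]
    by_cases hc : seen.contains (rend n) = true
    · obtain ⟨vv, hvv⟩ : ∃ vv, seen.get? (rend n) = some vv := by
        rw [PySem.Dict.contains_eq_isSome_get?] at hc
        exact Option.isSome_iff_exists.mp hc
      have hvge : (1 : Int) ≤ vv := hinv _ _ hvv
      have hgd : seen.getD (rend n) 0 = vv := by
        show (seen.get? (rend n)).getD 0 = vv
        rw [hvv]; rfl
      have hcne : (seen.getD (rend n) 0 + 1 == 1) = false := by
        rw [hgd]; simp; omega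
      simp only [hread, hc, if_true, hcne, Bool.false_eq_true, if_false]
      rw [pv_foldl_insert_comm _ _ _ _ _ (PySem.Dict.contains_insert_self dispB n (rend n)) hn,
          PySem.Dict.insert_insert_self]
      exact ih (seen.insert (rend n) (seen.getD (rend n) 0 + 1))
        (dispB.insert n (String.ofList ((rend n).toList ++ ' ' :: '#' ::
          PySem.Int.toChars (seen.getD (rend n) 0 + 1))))
        hrest
        (by
          intro r u hu
          rw [PySem.Dict.get?_insert] at hu
          split at hu
          · cases hu; rw [hgd]; omega
          · exact hinv _ _ hu)
    · have hc' : seen.contains (rend n) = false := by simpa using hc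
      have hgd0 : seen.getD (rend n) 0 = 0 := PySem.Dict.getD_of_not_contains seen 0 hc'
      have hce : (seen.getD (rend n) 0 + 1 == 1) = true := by rw [hgd0]; simp
      simp only [hread, hc, Bool.false_eq_true, if_false, hce, if_true]
      rw [hgd0]
      have hinv' : pvInv (seen.insert (rend n) 1) := by
        intro r u hu
        rw [PySem.Dict.get?_insert] at hu
        split at hu
        · cases hu; omega
        · exact hinv _ _ hu
      exact ih (seen.insert (rend n) 1) (dispB.insert n (rend n)) hrest hinv'

theorem pv_bucket_eq (parsed : PySem.Dict String (String × String))
    (disp : PySem.Dict String String) (bucket : List String) (hnd : bucket.Nodup) :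
    pvA_displayBucket parsed disp bucket = pvB_renderBucket parsed disp bucket := by
  unfold pvA_displayBucket pvB_renderBucket
  by_cases hl : (bucket.length == 1) = true
  · rw [if_pos hl, if_pos hl]
  · rw [if_neg hl, if_neg hl]
    show (bucket.foldl (fun (st : PySem.Dict String Int × PySem.Dict String String) n =>
            let rendered := st.2.getD n ""
            if st.1.contains rendered then
              let c := st.1.getD rendered 0 + 1
              (st.1.insert rendered c,
               st.2.insert n (String.ofList (rendered.toList ++ ' ' :: '#' :: PySem.Int.toChars c)))
            else (st.1.insert rendered 1, st.2))
          (PySem.Dict.empty,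
           bucket.foldl (fun disp n =>
             let p := parsed.getD n ("", "")
             if p.2 == "" then disp.insert n p.1
             else
               match pvA_chosen p.2
                   ((bucket.map (fun n => (parsed.getD n ("", "")).2)).filter (fun s => s != "")) 1 with
               | some c => disp.insert n (String.ofList (p.1.toList ++ ' ' :: c.toList))
               | none => disp.insert n (String.ofList (p.1.toList ++ ' ' :: p.2.toList))) disp)).2
      = (bucket.foldl (fun (st : PySem.Dict String Int × PySem.Dict String String) n =>
            let c := st.1.getD
              (pvRend parsed ((bucket.map (fun n => (parsed.getD n ("", "")).2)).filter (fun s => s != "")) n) 0 + 1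
            (st.1.insert
               (pvRend parsed ((bucket.map (fun n => (parsed.getD n ("", "")).2)).filter (fun s => s != "")) n) c,
             st.2.insert n
               (if c == 1 then
                  pvRend parsed ((bucket.map (fun n => (parsed.getD n ("", "")).2)).filter (fun s => s != "")) n
                else
                  String.ofList
                    ((pvRend parsed
                        ((bucket.map (fun n => (parsed.getD n ("", "")).2)).filter (fun s => s != "")) n).toList
                      ++ ' ' :: '#' :: PySem.Int.toChars c))))
          (PySem.Dict.empty, disp)).2
    rw [show (fun (disp : PySem.Dict String String) (n : String) =>
        let p := parsed.getD n ("", "")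
        if p.2 == "" then disp.insert n p.1
        else
          match pvA_chosen p.2
              ((bucket.map (fun n => (parsed.getD n ("", "")).2)).filter (fun s => s != "")) 1 with
          | some c => disp.insert n (String.ofList (p.1.toList ++ ' ' :: c.toList))
          | none => disp.insert n (String.ofList (p.1.toList ++ ' ' :: p.2.toList)))
      = (fun disp n => disp.insert n
          (pvRend parsed ((bucket.map (fun n => (parsed.getD n ("", "")).2)).filter (fun s => s != "")) n))
      from funext fun d => funext fun n => pv_rendA_pt parsed _ d n]
    exact pv_passes_eq
      (pvRend parsed ((bucket.map (fun n => (parsed.getD n ("", "")).2)).filter (fun s => s != "")))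
      bucket PySem.Dict.empty disp hnd
      (fun r v h => by rw [PySem.Dict.get?_empty] at h; cases h)

-- the grouping dictionaries agree, and B's order list is A's key list
theorem pv_groupsB_eq (names : List String) (parsed : PySem.Dict String (String × String)) :
    pvB_groups names parsed = ((pvA_groups names parsed).keys, pvA_groups names parsed) := by
  suffices H : ∀ (l : List String) (g : PySem.Dict String (List String)) (o : List String),
      o = g.keys →
      l.foldl (fun (st : List String × PySem.Dict String (List String)) n =>
          if st.2.contains (PySem.Str.lower (parsed.getD n ("", "")).1) then
            (st.1, st.2.modify (PySem.Str.lower (parsed.getD n ("", "")).1) [] (· ++ [n]))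
          else
            (st.1 ++ [PySem.Str.lower (parsed.getD n ("", "")).1],
             (st.2.insert (PySem.Str.lower (parsed.getD n ("", "")).1) []).modify
               (PySem.Str.lower (parsed.getD n ("", "")).1) [] (· ++ [n])))
        (o, g)
      = ((l.foldl (fun g n => g.modify (PySem.Str.lower (parsed.getD n ("", "")).1) [] (· ++ [n])) g).keys,
         l.foldl (fun g n => g.modify (PySem.Str.lower (parsed.getD n ("", "")).1) [] (· ++ [n])) g) by
    exact H names PySem.Dict.empty [] (by rw [PySem.Dict.keys_empty])
  intro l
  induction l with
  | nil => intro g o h; simp [h]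
  | cons n l ih =>
    intro g o h
    simp only [List.foldl_cons]
    by_cases hc : g.contains (PySem.Str.lower (parsed.getD n ("", "")).1) = true
    · rw [if_pos hc]
      apply ih
      show o = (g.insert (PySem.Str.lower (parsed.getD n ("", "")).1) _).keys
      rw [PySem.Dict.keys_insert_of_contains g _ hc, h]
    · have hc' : g.contains (PySem.Str.lower (parsed.getD n ("", "")).1) = false := by
        simpa using hc
      rw [if_neg (by rw [hc']; simp)]
      have hdict : (g.insert (PySem.Str.lower (parsed.getD n ("", "")).1) []).modify
            (PySem.Str.lower (parsed.getD n ("", "")).1) [] (· ++ [n])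
          = g.modify (PySem.Str.lower (parsed.getD n ("", "")).1) [] (· ++ [n]) := by
        show (g.insert _ []).insert _ _ = g.insert _ _
        rw [PySem.Dict.getD_insert_self, PySem.Dict.insert_insert_self,
            PySem.Dict.getD_of_not_contains g _ hc']
      rw [hdict]
      apply ih
      show o ++ _ = (g.insert (PySem.Str.lower (parsed.getD n ("", "")).1) _).keys
      rw [PySem.Dict.keys_insert_of_not_contains g _ hc', h]

theorem pv_getD_groups (names : List String) (parsed : PySem.Dict String (String × String))
    (c : String) :
    (pvA_groups names parsed).getD c [] = names.filter (fun n => pvKey parsed n == c) := by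
  unfold pvA_groups pvKey
  rw [show (names.foldl
        (fun g n => g.modify (PySem.Str.lower (parsed.getD n ("", "")).1) [] (· ++ [n]))
        PySem.Dict.empty)
      = ((names.map (fun n => (PySem.Str.lower (parsed.getD n ("", "")).1, n))).foldl
          (fun d p => d.modify p.1 [] (· ++ [p.2])) PySem.Dict.empty)
    from (List.foldl_map (f := fun n => (PySem.Str.lower (parsed.getD n ("", "")).1, n))
      (g := fun d p => d.modify p.1 [] (· ++ [p.2])) (l := names) (init := PySem.Dict.empty)).symm]
  rw [PySem.Dict.getD_foldl_modify_append, PySem.Dict.getD_empty, List.nil_append,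
      List.filter_map, List.map_map]
  simp [Function.comp_def]

-- ===== VERDICT (by name: the statement is the Claim_ definition above) =====
theorem compute_display_names_spec : Claim_equal_compute_display_names := by
  intro fn _
  unfold Spec_compute_display_names
  rw [show compute_display_names fn
      = ((pvA_groups (PySem.List.dedup fn) (pvA_parsed (PySem.List.dedup fn))).values.foldl
          (pvA_displayBucket (pvA_parsed (PySem.List.dedup fn))) PySem.Dict.empty).items
    from rfl]
  rw [show compute_display_names_alt fn
      = (((pvB_groups (PySem.List.dedup fn) (pvB_parsed (PySem.List.dedup fn))).1).foldl
          (fun disp key => pvB_renderBucket (pvB_parsed (PySem.List.dedup fn)) disp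
            ((pvB_groups (PySem.List.dedup fn) (pvB_parsed (PySem.List.dedup fn))).2.getD key []))
          PySem.Dict.empty).items
    from rfl]
  rw [← pv_parsed_eq]
  rw [pv_groupsB_eq]
  have hkeys_nodup : (pvA_groups (PySem.List.dedup fn) (pvA_parsed (PySem.List.dedup fn))).keys.Nodup := by
    unfold pvA_groups
    exact PySem.Dict.nodup_keys_foldl_modify_key _ _ _ _ _
      (by rw [PySem.Dict.keys_empty]; exact List.nodup_nil)
  rw [PySem.Dict.values_eq_map_keys _ hkeys_nodup [], List.foldl_map]
  have hbnd : ∀ c, ((pvA_groups (PySem.List.dedup fn) (pvA_parsed (PySem.List.dedup fn))).getD c []).Nodup := by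
    intro c
    rw [pv_getD_groups]
    exact (PySem.List.nodup_dedup fn).filter _
  rw [show (fun (x : PySem.Dict String String) (y : String) =>
        pvA_displayBucket (pvA_parsed (PySem.List.dedup fn)) x
          ((pvA_groups (PySem.List.dedup fn) (pvA_parsed (PySem.List.dedup fn))).getD y []))
      = (fun disp key =>
          pvB_renderBucket (pvA_parsed (PySem.List.dedup fn)) disp
            ((pvA_groups (PySem.List.dedup fn) (pvA_parsed (PySem.List.dedup fn))).getD key []))
    from funext fun d => funext fun c => pv_bucket_eq _ d _ (hbnd c)]
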